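-- pv_equiv track=rewrite | github.com/rexarski/biji-ben | uoft/CSC108/FINAL/final.summer_2009/balanced.py | all_balanced
-- ===== SOURCE A (Python) =====
-- def all_balanced (L):
--   segs = []
--   for i in range(len(L)):
--     balance = 0
--     for j in range (i, len(L)):
--       if L[j] == 1:
--         balance += 1
--       else:
--         balance -= 1
--       if balance == 0:
--         segs.append (L[i:j+1])
--   return segs
-- ===== SOURCE B (Python) =====
-- def all_balanced(L):
--     # One pass with a dict from running prefix-balance to the list of prefix
--     # indices where it occurs; each time the balance p reappears at prefix
--     # index j+1, every earlier occurrence i of p starts a balanced segment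
--     # ending at j.  Then emit the segments grouped by start, in order.
--     n = len(L)
--     pos = {0: [0]}          # prefix value -> ascending list of prefix indices
--     ends = {}               # start index -> ascending list of end bounds (exclusive)
--     p = 0
--     for j in range(n):
--         p += 1 if L[j] == 1 else -1
--         for i in pos.get(p, []):
--             ends[i] = ends.get(i, []) + [j + 1]
--         pos[p] = pos.get(p, []) + [j + 1]
--     out = []
--     for i in range(n):
--         for k in ends.get(i, []):
--             out.append(L[i:k])
--     return out
-- ===== Notes on version B (the rewrite author's own statement) =====
-- stated objective: faster
-- what changed: Replaces the nested rescan (for every start, re-walk the suffix accumulating a balance) by a single pass that hashes each running prefix-balance to its list of prefix indices, so matching (start,end) pairs are found directly and only the output segments are materialised, grouped by start.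
import Mathlib
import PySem

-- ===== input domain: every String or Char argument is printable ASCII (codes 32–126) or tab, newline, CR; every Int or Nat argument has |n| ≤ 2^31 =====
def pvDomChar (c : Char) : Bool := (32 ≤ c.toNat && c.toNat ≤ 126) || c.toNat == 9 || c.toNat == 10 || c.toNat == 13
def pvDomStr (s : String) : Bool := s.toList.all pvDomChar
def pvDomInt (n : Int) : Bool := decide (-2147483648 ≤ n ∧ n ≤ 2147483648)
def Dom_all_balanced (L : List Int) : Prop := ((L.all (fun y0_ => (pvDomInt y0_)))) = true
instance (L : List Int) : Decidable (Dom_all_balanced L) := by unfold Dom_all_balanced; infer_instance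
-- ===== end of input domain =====

-- B replaces A's quadratic rescan by one pass hashing each running prefix-balance
-- to its prefix indices (objective: faster; a timing run measures the speed-up).


-- ===== PORT A =====
def all_balanced (L : List Int) : List (List Int) :=
  (PySem.List.pyRange 0 (L.length : Int) 1).foldl (fun segs i =>
    ((PySem.List.pyRange i (L.length : Int) 1).foldl
      (fun (st : List (List Int) × Int) j =>
        let balance := if PySem.List.pyGetD L j 0 = 1 then st.2 + 1 else st.2 - 1
        if balance = 0 then (st.1 ++ [PySem.List.slice L (some i) (some (j + 1))], balance)
        else (st.1, balance))
      (segs, 0)).1) []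

-- ===== PORT B =====
-- the first loop of Source B: (pos, ends, p) after the j-loop over range(m)
def altLoop (L : List Int) (m : Int) :
    PySem.Dict Int (List Int) × PySem.Dict Int (List Int) × Int :=
  (PySem.List.pyRange 0 m 1).foldl
    (fun st j =>
      let p := if PySem.List.pyGetD L j 0 = 1 then st.2.2 + 1 else st.2.2 - 1
      let ends := (st.1.getD p []).foldl
        (fun e i => e.insert i (e.getD i [] ++ [j + 1])) st.2.1
      let pos := st.1.insert p (st.1.getD p [] ++ [j + 1])
      (pos, ends, p))
    (PySem.Dict.empty.insert 0 [0], PySem.Dict.empty, 0)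

def all_balanced_alt (L : List Int) : List (List Int) :=
  let st := altLoop L (L.length : Int)
  (PySem.List.pyRange 0 (L.length : Int) 1).foldl
    (fun out i => (st.2.1.getD i []).foldl
      (fun out k => out ++ [PySem.List.slice L (some i) (some k)]) out) []

-- ===== PRECONDITION & SPEC =====
def Spec_all_balanced (L : List Int) (out : List (List Int)) : Prop := out = all_balanced_alt L
instance (L : List Int) (out : List (List Int)) : Decidable (Spec_all_balanced L out) := by unfold Spec_all_balanced; infer_instance

-- ===== CLAIM (what is proved, stated in full; the proofs are below) =====
def Claim_equal_all_balanced : Prop := ∀ (L : List Int), Dom_all_balanced L → Spec_all_balanced L (all_balanced L)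

-- ===== LEMMAS AND PROOFS =====

-- the ±1 step and the running prefix balance of the first k elements
def pvStep (x : Int) : Int := if x = 1 then 1 else -1
def pvPfx (L : List Int) (k : Int) : Int := ((L.take k.toNat).map pvStep).sum

-- prefix indices in [0, m] whose balance is v  (contents of pos[v])
def posSpec (L : List Int) (m v : Int) : List Int :=
  (PySem.List.pyRange 0 (m + 1) 1).filter (fun k => pvPfx L k == v)

-- end bounds in [i+1, m] matching start i  (contents of ends[i])
def endsSpec (L : List Int) (m i : Int) : List Int :=
  (PySem.List.pyRange (i + 1) (m + 1) 1).filter (fun k => pvPfx L k == pvPfx L i)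

lemma pvPfx_succ (L : List Int) (j : Int) (h0 : 0 ≤ j) (h : j.toNat < L.length) :
    pvPfx L (j + 1) = pvPfx L j + pvStep (L[j.toNat]) := by
  have h1 : (j + 1).toNat = j.toNat + 1 := by omega
  unfold pvPfx
  rw [h1, List.map_take, List.map_take,
    List.sum_take_succ _ _ (by simpa using h)]
  simp

lemma mem_posSpec (L : List Int) (m v i : Int) :
    i ∈ posSpec L m v ↔ 0 ≤ i ∧ i ≤ m ∧ pvPfx L i = v := by
  simp [posSpec, PySem.List.mem_pyRange_one]
  tauto

lemma nodup_posSpec (L : List Int) (m v : Int) : (posSpec L m v).Nodup := by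
  exact (PySem.List.nodup_pyRange_one 0 (m + 1)).filter _

lemma getD_foldl_insert_append (S : List Int) (hS : S.Nodup)
    (e : PySem.Dict Int (List Int)) (w i : Int) :
    (S.foldl (fun e i => e.insert i (e.getD i [] ++ [w])) e).getD i [] =
      e.getD i [] ++ (if i ∈ S then [w] else []) := by
  induction S generalizing e with
  | nil => simp
  | cons a S ih =>
    simp only [List.foldl_cons]
    rw [ih hS.of_cons]
    by_cases hia : i = a
    · subst hia
      have : i ∉ S := (List.nodup_cons.mp hS).1
      simp [this, PySem.Dict.getD_insert_self]
    · rw [PySem.Dict.getD_insert_of_ne _ _ _ hia]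
      simp [hia]

lemma posSpec_succ (L : List Int) (m v : Int) (h0 : 0 ≤ m) :
    posSpec L (m + 1) v =
      posSpec L m v ++ (if pvPfx L (m + 1) = v then [m + 1] else []) := by
  unfold posSpec
  rw [PySem.List.pyRange_one_succ_right (by omega), List.filter_append]
  congr 1
  by_cases h : pvPfx L (m + 1) = v <;> simp [h]

lemma endsSpec_succ (L : List Int) (m i : Int) :
    endsSpec L (m + 1) i =
      endsSpec L m i ++
        (if i ≤ m ∧ pvPfx L (m + 1) = pvPfx L i then [m + 1] else []) := by
  unfold endsSpec
  by_cases him : i ≤ m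
  · rw [PySem.List.pyRange_one_succ_right (by omega), List.filter_append]
    congr 1
    by_cases h : pvPfx L (m + 1) = pvPfx L i <;> simp [h, him]
  · rw [PySem.List.pyRange_one_eq_nil (by omega), PySem.List.pyRange_one_eq_nil (by omega)]
    simp [him]

lemma altLoop_inv (L : List Int) (m : Nat) (hm : m ≤ L.length) :
    (altLoop L (m : Int)).2.2 = pvPfx L (m : Int) ∧
    (∀ v, (altLoop L (m : Int)).1.getD v [] = posSpec L (m : Int) v) ∧
    (∀ i, 0 ≤ i → (altLoop L (m : Int)).2.1.getD i [] = endsSpec L (m : Int) i) := by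
  induction m with
  | zero =>
    unfold altLoop
    rw [PySem.List.pyRange_one_eq_nil (by omega)]
    refine ⟨by simp [pvPfx], fun v => ?_, fun i hi => ?_⟩
    · rw [List.foldl_nil, PySem.Dict.getD_insert]
      have hz : pvPfx L 0 = 0 := by simp [pvPfx]
      have h01 : PySem.List.pyRange 0 ((0 : Int) + 1) = [0] :=
        PySem.List.pyRange_one_singleton 0
      unfold posSpec
      rw [Nat.cast_zero, h01]
      by_cases hv : v = 0
      · subst hv; simp [hz]
      · simp [hz, hv, Ne.symm hv]
    · rw [List.foldl_nil]
      simp [endsSpec, PySem.List.pyRange_one_eq_nil (by omega : (1 : Int) ≤ i + 1)]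
  | succ m ih =>
    have hmle : m ≤ L.length := by omega
    obtain ⟨hp, hpos, hends⟩ := ih hmle
    have hmlt : m < L.length := by omega
    have hc : ((m + 1 : Nat) : Int) = (m : Int) + 1 := by push_cast; ring
    have hget : PySem.List.pyGetD L (m : Int) 0 = L[m] := by
      have h := PySem.List.pyGetD_eq_getElem L (i := (m : Int)) 0 (by omega)
        (by exact_mod_cast hmlt)
      simpa using h
    have hstep : altLoop L ((m : Int) + 1) =
        (fun (st : PySem.Dict Int (List Int) × PySem.Dict Int (List Int) × Int) (j : Int) =>
          let p := if PySem.List.pyGetD L j 0 = 1 then st.2.2 + 1 else st.2.2 - 1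
          let ends := (st.1.getD p []).foldl
            (fun e i => e.insert i (e.getD i [] ++ [j + 1])) st.2.1
          let pos := st.1.insert p (st.1.getD p [] ++ [j + 1])
          (pos, ends, p)) (altLoop L (m : Int)) (m : Int) := by
      unfold altLoop
      rw [PySem.List.pyRange_one_succ_right (by omega), List.foldl_append,
        List.foldl_cons, List.foldl_nil]
    have hp1 : (if PySem.List.pyGetD L (m : Int) 0 = 1 then (altLoop L (m : Int)).2.2 + 1
          else (altLoop L (m : Int)).2.2 - 1) = pvPfx L ((m : Int) + 1) := by
      have hs := pvPfx_succ L (m : Int) (by omega) (by simpa using hmlt)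
      simp only [Int.toNat_natCast] at hs
      rw [hget, hp, hs]
      unfold pvStep
      split_ifs <;> ring
    rw [hc, hstep]
    simp only []
    rw [hp1]
    refine ⟨rfl, fun v => ?_, fun i hi => ?_⟩
    · rw [PySem.Dict.getD_insert, hpos, hpos, posSpec_succ L (m : Int) v (by omega)]
      by_cases hv : v = pvPfx L ((m : Int) + 1) <;> simp [hv, eq_comm]
    · rw [hpos, getD_foldl_insert_append _ (nodup_posSpec L (m : Int) _) _ _ i,
        hends i hi, endsSpec_succ L (m : Int) i]
      have hiff : i ∈ posSpec L (m : Int) (pvPfx L ((m : Int) + 1)) ↔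
          (i ≤ (m : Int) ∧ pvPfx L ((m : Int) + 1) = pvPfx L i) := by
        rw [mem_posSpec]
        constructor
        · rintro ⟨_, h1, h2⟩; exact ⟨h1, h2.symm⟩
        · rintro ⟨h1, h2⟩; exact ⟨hi, h1, h2.symm⟩
      simp only [hiff]

lemma A_inner (L : List Int) (i : Int) (hi : 0 ≤ i) :
    ∀ (t : Nat) (j : Int) (segs : List (List Int)) (b : Int),
      i ≤ j → ((L.length : Int) - j).toNat = t → b = pvPfx L j - pvPfx L i →
      ((PySem.List.pyRange j (L.length : Int) 1).foldl
        (fun (st : List (List Int) × Int) j =>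
          let balance := if PySem.List.pyGetD L j 0 = 1 then st.2 + 1 else st.2 - 1
          if balance = 0 then (st.1 ++ [PySem.List.slice L (some i) (some (j + 1))], balance)
          else (st.1, balance))
        (segs, b)).1
      = segs ++ ((PySem.List.pyRange (j + 1) ((L.length : Int) + 1) 1).filter
            (fun k => pvPfx L k == pvPfx L i)).map
          (fun k => PySem.List.slice L (some i) (some k)) := by
  intro t
  induction t with
  | zero =>
    intro j segs b hij ht hb
    rw [PySem.List.pyRange_one_eq_nil (by omega),
      PySem.List.pyRange_one_eq_nil (by omega)]
    simp
  | succ t ih =>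
    intro j segs b hij ht hb
    have hjn : j < (L.length : Int) := by omega
    have hjt : j.toNat < L.length := by omega
    rw [PySem.List.pyRange_one_cons hjn, List.foldl_cons]
    have hget : PySem.List.pyGetD L j 0 = L[j.toNat] :=
      PySem.List.pyGetD_eq_getElem L 0 (by omega) hjn
    have hbal : (if PySem.List.pyGetD L j 0 = 1 then b + 1 else b - 1)
        = pvPfx L (j + 1) - pvPfx L i := by
      rw [hget, pvPfx_succ L j (by omega) hjt, hb]
      unfold pvStep
      split_ifs <;> ring
    rw [PySem.List.pyRange_one_cons (b := (L.length : Int) + 1) (by omega)]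
    by_cases hz : pvPfx L (j + 1) = pvPfx L i
    · have hz' : (if PySem.List.pyGetD L j 0 = 1 then b + 1 else b - 1) = 0 := by
        rw [hbal, hz]; ring
      have hstep : (let balance := if PySem.List.pyGetD L j 0 = 1 then (segs, b).2 + 1 else (segs, b).2 - 1
            if balance = 0 then ((segs, b).1 ++ [PySem.List.slice L (some i) (some (j + 1))], balance)
            else ((segs, b).1, balance))
          = (segs ++ [PySem.List.slice L (some i) (some (j + 1))], (0 : Int)) := by
        simp [hz']
      rw [hstep, ih (j + 1) (segs ++ [PySem.List.slice L (some i) (some (j + 1))]) 0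
        (by omega) (by omega) (by rw [hz]; ring)]
      simp [hz]
    · have hz' : ¬ (if PySem.List.pyGetD L j 0 = 1 then b + 1 else b - 1) = 0 := by
        rw [hbal]; intro hc; exact hz (by omega)
      have hstep : (let balance := if PySem.List.pyGetD L j 0 = 1 then (segs, b).2 + 1 else (segs, b).2 - 1
            if balance = 0 then ((segs, b).1 ++ [PySem.List.slice L (some i) (some (j + 1))], balance)
            else ((segs, b).1, balance))
          = (segs, pvPfx L (j + 1) - pvPfx L i) := by
        simp [hbal, sub_eq_zero, hz]
      rw [hstep, ih (j + 1) segs (pvPfx L (j + 1) - pvPfx L i) (by omega) (by omega) rfl]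
      simp [hz]

lemma A_flat (L : List Int) :
    all_balanced L = (PySem.List.pyRange 0 (L.length : Int) 1).flatMap
      (fun i => (endsSpec L (L.length : Int) i).map
        (fun k => PySem.List.slice L (some i) (some k))) := by
  unfold all_balanced
  rw [PySem.List.foldl_congr_mem _ _
    (fun segs i => segs ++ (endsSpec L (L.length : Int) i).map
      (fun k => PySem.List.slice L (some i) (some k))) []
    (fun acc i hi => by
      have h0i : 0 ≤ i := (PySem.List.mem_pyRange_one.mp hi).1
      exact A_inner L i h0i ((L.length : Int) - i).toNat i acc 0 le_rfl rfl (by ring))]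
  rw [PySem.List.foldl_append_eq_flatMap]
  simp

lemma B_flat (L : List Int) :
    all_balanced_alt L = (PySem.List.pyRange 0 (L.length : Int) 1).flatMap
      (fun i => (endsSpec L (L.length : Int) i).map
        (fun k => PySem.List.slice L (some i) (some k))) := by
  obtain ⟨-, -, hends⟩ := altLoop_inv L L.length le_rfl
  unfold all_balanced_alt
  rw [PySem.List.foldl_congr_mem _ _
    (fun out i => out ++ (endsSpec L (L.length : Int) i).map
      (fun k => PySem.List.slice L (some i) (some k))) []
    (fun acc i hi => by
      have h0i : 0 ≤ i := (PySem.List.mem_pyRange_one.mp hi).1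
      rw [PySem.List.foldl_append_singleton_eq_map, hends i h0i])]
  rw [PySem.List.foldl_append_eq_flatMap]
  simp

-- ===== VERDICT (by name: the statement is the Claim_ definition above) =====
theorem all_balanced_spec : Claim_equal_all_balanced := by
  intro L _
  unfold Spec_all_balanced
  rw [A_flat, B_flat]
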